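-- pv_equiv track=rewrite | github.com/erjantj/hackerrank | minute-to-win-It.py | minuteToWinIt
-- ===== SOURCE A (Python) =====
-- def minuteToWinIt(a, k):
--     memo = {}
--     a_len = len(a)
--
--     maxSame = 0
--
--     for i in range(a_len):
--         first = a[i]-i*k
--         if first not in memo:
--             memo[first] = 0
--         memo[first] += 1
--
--         if memo[first] > maxSame:
--             maxSame = memo[first]
--
--     return a_len-maxSame
-- ===== SOURCE B (Python) =====
-- def minuteToWinIt(a, k):
--     # dict-free: sort the offset keys, then scan for the longest run of equal
--     # adjacent values; equal keys are contiguous after sorting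
--     keys = sorted(v - i * k for i, v in enumerate(a))
--     best = run = 0
--     prev = None
--     for x in keys:
--         run = run + 1 if x == prev else 1
--         prev = x
--         best = max(best, run)
--     return len(a) - best
-- ===== Notes on version B (the rewrite author's own statement) =====
-- stated objective: alternative
-- what changed: A's dict-based count-with-running-max pass is replaced by a dictionary-free sort-then-scan: sort the offset keys, then one linear scan finds the longest run of equal adjacent values, which after sorting is the maximum multiplicity.
import Mathlib
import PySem

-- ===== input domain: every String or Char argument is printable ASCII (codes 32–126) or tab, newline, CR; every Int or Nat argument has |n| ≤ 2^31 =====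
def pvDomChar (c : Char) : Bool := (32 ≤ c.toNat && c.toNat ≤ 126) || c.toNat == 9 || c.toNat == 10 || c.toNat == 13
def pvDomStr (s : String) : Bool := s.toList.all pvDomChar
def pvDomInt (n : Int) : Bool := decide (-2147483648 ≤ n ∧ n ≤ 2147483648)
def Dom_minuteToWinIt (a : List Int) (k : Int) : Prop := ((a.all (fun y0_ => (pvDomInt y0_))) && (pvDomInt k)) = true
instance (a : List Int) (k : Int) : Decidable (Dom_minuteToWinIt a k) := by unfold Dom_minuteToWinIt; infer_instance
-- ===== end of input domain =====

-- B replaces A's dict-based count-with-running-max pass by a dictionary-free sort-then-scan: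
-- sort the offset keys, then one linear scan finds the longest run of equal adjacent values.

-- ===== PORT A =====
def minuteToWinIt (a : List Int) (k : Int) : Int :=
  let aLen : Int := PySem.List.len a
  let res := (PySem.List.pyRange 0 aLen 1).foldl
    (fun (st : PySem.Dict Int Int × Int) (i : Int) =>
      -- i ranges over range(len(a)), so a[i] never raises; the pyGetD default is never used
      let first := PySem.List.pyGetD a i 0 - i * k
      let memo := if st.1.contains first then st.1 else st.1.insert first 0
      let memo := memo.modify first 0 (· + 1)
      if memo.getD first 0 > st.2 then (memo, memo.getD first 0) else (memo, st.2))
    (PySem.Dict.empty, 0)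
  aLen - res.2

-- ===== PORT B =====
-- the for loop of Source B: state (best, run, prev)
def stepB (st : Int × Int × Option Int) (x : Int) : Int × Int × Option Int :=
  let run := if some x = st.2.2 then st.2.1 + 1 else 1
  (max st.1 run, run, some x)

def minuteToWinIt_alt (a : List Int) (k : Int) : Int :=
  let keys := PySem.List.sorted ((PySem.List.enumerate a 0).map (fun p => p.2 - p.1 * k))
    (fun x => x) false
  let st := keys.foldl stepB (0, 0, none)
  PySem.List.len a - st.1

-- ===== PRECONDITION & SPEC =====
def Spec_minuteToWinIt (a : List Int) (k : Int) (out : Int) : Prop := out = minuteToWinIt_alt a k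
instance (a : List Int) (k : Int) (out : Int) : Decidable (Spec_minuteToWinIt a k out) := by unfold Spec_minuteToWinIt; infer_instance

-- ===== CLAIM (what is proved, stated in full; the proofs are below) =====
def Claim_equal_minuteToWinIt : Prop := ∀ (a : List Int) (k : Int), Dom_minuteToWinIt a k → Spec_minuteToWinIt a k (minuteToWinIt a k)

-- ===== LEMMAS AND PROOFS =====

-- A's loop step, on the already-computed key
def stepA (st : PySem.Dict Int Int × Int) (x : Int) : PySem.Dict Int Int × Int :=
  let memo := if st.1.contains x then st.1 else st.1.insert x 0
  let memo := memo.modify x 0 (· + 1)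
  if memo.getD x 0 > st.2 then (memo, memo.getD x 0) else (memo, st.2)

-- the list of offset keys both programs group by
def keysOf (a : List Int) (k : Int) : List Int :=
  (PySem.List.enumerate a 0).map (fun p => p.2 - p.1 * k)

-- max frequency over the distinct elements of l (0 for [])
def Fm (l : List Int) : Int :=
  ((PySem.Set.ofList l).map (fun x => (l.count x : Int))).foldl max 0

lemma foldl_max_comm (l : List Int) : ∀ (x y : Int), l.foldl max (max x y) = max y (l.foldl max x) := by
  induction l with
  | nil => intro x y; simp [max_comm]
  | cons c t ih =>
    intro x y
    simp only [List.foldl_cons]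
    rw [show max (max x y) c = max (max x c) y by omega, ih]

lemma foldl_max_middle (l1 l2 : List Int) (x b : Int) :
    (l1 ++ b :: l2).foldl max x = max b ((l1 ++ l2).foldl max x) := by
  induction l1 generalizing x with
  | nil => simp [foldl_max_comm]
  | cons c t ih => simp only [List.cons_append, List.foldl_cons]; exact ih _

lemma Fm_append (p : List Int) (x : Int) :
    Fm (p ++ [x]) = max (Fm p) ((p.count x : Int) + 1) := by
  have hset : PySem.Set.ofList (p ++ [x]) = PySem.Set.add (PySem.Set.ofList p) x := by
    rw [PySem.Set.ofList_eq_foldl, PySem.Set.ofList_eq_foldl, List.foldl_append]; rfl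
  have hne : ∀ y : Int, y ≠ x → ((p ++ [x]).count y : Int) = (p.count y : Int) := by
    intro y hy
    rw [List.count_append]
    simp [Ne.symm hy]
  have hx' : ((p ++ [x]).count x : Int) = (p.count x : Int) + 1 := by
    rw [List.count_append]; simp
  by_cases hx : x ∈ p
  · have hmem : x ∈ PySem.Set.ofList p := (PySem.Set.mem_ofList _ _).2 hx
    have hadd : PySem.Set.add (PySem.Set.ofList p) x = PySem.Set.ofList p := by
      simp [PySem.Set.add, PySem.Set.contains, hmem]
    obtain ⟨S1, S2, hS⟩ := List.append_of_mem hmem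
    have hnd : (PySem.Set.ofList p).Nodup := PySem.Set.nodup_ofList p
    rw [hS] at hnd
    rcases List.nodup_append.1 hnd with ⟨-, h2, hdisj⟩
    have hx1 : x ∉ S1 := fun h => hdisj x h x (by simp) rfl
    have e1 : S1.map (fun y => ((p ++ [x]).count y : Int)) = S1.map (fun y => (p.count y : Int)) :=
      List.map_congr_left (fun y hy => hne y (fun h => hx1 (h ▸ hy)))
    have e2 : S2.map (fun y => ((p ++ [x]).count y : Int)) = S2.map (fun y => (p.count y : Int)) := by
      have hx2 : x ∉ S2 := fun h => (List.nodup_cons.1 h2).1 h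
      exact List.map_congr_left (fun y hy => hne y (fun h => hx2 (h ▸ hy)))
    unfold Fm
    rw [hset, hadd, hS, List.map_append, List.map_cons, List.map_append, List.map_cons,
        e1, e2, hx', foldl_max_middle, foldl_max_middle]
    omega
  · have hmem : x ∉ PySem.Set.ofList p := fun h => hx ((PySem.Set.mem_ofList _ _).1 h)
    have hadd : PySem.Set.add (PySem.Set.ofList p) x = PySem.Set.ofList p ++ [x] := by
      simp [PySem.Set.add, PySem.Set.contains, hmem]
    have e1 : (PySem.Set.ofList p).map (fun y => ((p ++ [x]).count y : Int))
        = (PySem.Set.ofList p).map (fun y => (p.count y : Int)) :=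
      List.map_congr_left (fun y hy => hne y
        (fun h => hx (h ▸ (PySem.Set.mem_ofList _ _).1 hy)))
    have hc0 : p.count x = 0 := List.count_eq_zero.2 hx
    unfold Fm
    rw [hset, hadd, List.map_append, List.map_cons, List.map_nil, e1, hx', hc0,
        List.foldl_append]
    simp

lemma portA_eq (a : List Int) (k : Int) :
    minuteToWinIt a k = PySem.List.len a - ((keysOf a k).foldl stepA (PySem.Dict.empty, 0)).2 := by
  simp only [minuteToWinIt]
  rw [keysOf, PySem.List.enumerate_eq_map_pyRange (d := 0), List.map_map, List.foldl_map]
  rfl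

-- d[k] = f(d.get(k,0)) after a d[k]=0 seeding is the same dict as without the seeding
lemma modify_insert_zero (d : PySem.Dict Int Int) (x : Int) (f : Int → Int)
    (hc : d.contains x = false) :
    (d.insert x 0).modify x 0 f = d.modify x 0 f := by
  show (d.insert x 0).insert x (f ((d.insert x 0).getD x 0)) = d.insert x (f (d.getD x 0))
  rw [PySem.Dict.getD_insert_self, PySem.Dict.insert_insert_self]
  simp [PySem.Dict.getD_of_not_contains, hc]

lemma afold_eq (l : List Int) :
    l.foldl stepA (PySem.Dict.empty, 0) = (PySem.Dict.counter l, Fm l) := by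
  induction l using List.reverseRecOn with
  | nil => rfl
  | append_singleton p x ih =>
    rw [List.foldl_append, ih]
    simp only [List.foldl_cons, List.foldl_nil]
    unfold stepA
    have hcnt : PySem.Dict.counter (p ++ [x]) = (PySem.Dict.counter p).modify x 0 (· + 1) := by
      rw [PySem.Dict.counter_eq_foldl, PySem.Dict.counter_eq_foldl, List.foldl_append]; rfl
    have hd : (if (PySem.Dict.counter p).contains x then PySem.Dict.counter p
          else (PySem.Dict.counter p).insert x 0).modify x 0 (· + 1)
        = (PySem.Dict.counter p).modify x 0 (· + 1) := by
      by_cases hc : (PySem.Dict.counter p).contains x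
      · rw [if_pos hc]
      · rw [if_neg hc, modify_insert_zero _ _ _ (Bool.not_eq_true _ ▸ hc)]
    dsimp only
    rw [hd, ← hcnt]
    have hg : (PySem.Dict.counter (p ++ [x])).getD x 0 = (p.count x : Int) + 1 := by
      rw [PySem.Dict.getD_counter, List.count_append]
      simp
    rw [hg, Fm_append]
    split_ifs with h <;> simp <;> omega

lemma Fm_perm (l l' : List Int) (hp : l.Perm l') : Fm l = Fm l' := by
  have hcnt : ∀ y : Int, (fun x => (l.count x : Int)) y = (fun x => (l'.count x : Int)) y := by
    intro y; simp [hp.count_eq]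
  have hsets : (PySem.Set.ofList l).Perm (PySem.Set.ofList l') := by
    rw [List.perm_ext_iff_of_nodup (PySem.Set.nodup_ofList l) (PySem.Set.nodup_ofList l')]
    intro y
    rw [PySem.Set.mem_ofList, PySem.Set.mem_ofList]
    exact hp.mem_iff
  have hmaps : ((PySem.Set.ofList l).map (fun x => (l.count x : Int))).Perm
      ((PySem.Set.ofList l').map (fun x => (l'.count x : Int))) := by
    have : ((PySem.Set.ofList l').map (fun x => (l.count x : Int)))
        = (PySem.Set.ofList l').map (fun x => (l'.count x : Int)) :=
      List.map_congr_left (fun y _ => hcnt y)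
    exact this ▸ hsets.map _
  unfold Fm
  exact @List.Perm.foldl_eq _ _ max _ _ ⟨fun b a a' => by omega⟩ hmaps 0

-- every element of an ascending list is ≤ its last element
lemma pairwise_le_getLast? : ∀ (p : List Int), p.Pairwise (· ≤ ·) →
    ∀ y ∈ p, ∀ v, p.getLast? = some v → y ≤ v := by
  intro p
  induction p with
  | nil => intro _ y hy; cases hy
  | cons c t ih =>
    intro hp y hy v hv
    rcases List.pairwise_cons.1 hp with ⟨hc, ht⟩
    match t with
    | [] =>
      simp at hv hy
      omega
    | d :: r =>
      rw [List.getLast?_cons_cons] at hv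
      rcases List.mem_cons.1 hy with rfl | hyt
      · have hvmem : v ∈ d :: r := List.mem_of_getLast? hv
        exact hc v hvmem
      · exact ih ht y hyt v hv

-- the scan invariant: over an ascending list, the fold returns
-- (max multiplicity, multiplicity of the last element, the last element)
def tailInfo (s : List Int) : Int × Option Int :=
  match s.getLast? with
  | none => (0, none)
  | some v => ((s.count v : Int), some v)

lemma bscan : ∀ (s : List Int), s.Pairwise (· ≤ ·) →
    s.foldl stepB (0, 0, none) = (Fm s, tailInfo s) := by
  intro s
  induction s using List.reverseRecOn with
  | nil => intro _; rfl
  | append_singleton p x ih =>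
    intro hp
    have hpp : p.Pairwise (· ≤ ·) := (List.pairwise_append.1 hp).1
    rw [List.foldl_append, ih hpp, List.foldl_cons, List.foldl_nil]
    have hlast : (p ++ [x]).getLast? = some x := by
      simp
    match hL : p.getLast? with
    | none =>
      have hpnil : p = [] := by
        cases p with
        | nil => rfl
        | cons c t => simp [List.getLast?_eq_some_getLast] at hL
      subst hpnil
      have h1 : Fm ([] ++ [x]) = 1 := by
        rw [Fm_append]; simp [Fm]
      simp only [tailInfo, hL, stepB, List.nil_append] at h1 ⊢
      rw [h1]
      simp
      norm_num [Fm]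
    | some v =>
      have hpne : p ≠ [] := by
        intro h; subst h; simp at hL
      have hcv : ∀ y ∈ p, y ≤ v := fun y hy => pairwise_le_getLast? p hpp y hy v hL
      by_cases hx : x = v
      · subst hx
        simp only [tailInfo, hL, stepB, hlast]
        rw [Fm_append]
        have hcnt : ((p ++ [x]).count x : Int) = (p.count x : Int) + 1 := by
          rw [List.count_append]; push_cast; simp
        rw [hcnt]
        simp
      · have hxp : x ∉ p := by
          intro hmem
          have h1 : x ≤ v := hcv x hmem
          have h2 : v ≤ x := by
            have hvmem : v ∈ p := List.mem_of_getLast? hL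
            have := (List.pairwise_append.1 hp).2.2 v hvmem x (by simp)
            exact this
          omega
        simp only [tailInfo, hL, stepB, hlast]
        have hne : (some x = some v) = False := by simp [hx]
        simp only [hne, if_false]
        rw [Fm_append]
        have hc0 : p.count x = 0 := List.count_eq_zero.2 hxp
        have hcnt : ((p ++ [x]).count x : Int) = 1 := by
          rw [List.count_append, hc0]; simp
        rw [hcnt, hc0]
        push_cast
        rfl

lemma portB_eq (a : List Int) (k : Int) :
    minuteToWinIt_alt a k = PySem.List.len a - Fm (keysOf a k) := by
  simp only [minuteToWinIt_alt, keysOf]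
  set l := (PySem.List.enumerate a 0).map (fun p => p.2 - p.1 * k) with hl
  have hsorted := PySem.List.sorted_pairwise (xs := l) (key := fun x => x)
  rw [bscan _ hsorted]
  rw [Fm_perm _ l (PySem.List.sorted_perm l (fun x => x) false)]

-- ===== VERDICT (by name: the statement is the Claim_ definition above) =====
theorem minuteToWinIt_spec : Claim_equal_minuteToWinIt := by
  intro a k _
  unfold Spec_minuteToWinIt
  rw [portA_eq, portB_eq, afold_eq]
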